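-- pv_equiv track=rewrite | github.com/jdfalk/audiobook-organizer | scripts/openai_parsing_test.py | categorize_by_source
-- ===== SOURCE A (Python) =====
-- from collections import Counter, defaultdict
--
-- def categorize_by_source(files: list[str]) -> dict[str, list[str]]:
--     """
--     Categorize files by their source directory.
--
--     Args:
--         files: List of file paths
--
--     Returns:
--         Dictionary mapping source path to list of files
--     """
--     categorized = defaultdict(list)
--
--     # Define the source paths we're interested in
--     source_paths = [
--         "/mnt/bigdata/books/abooks",
--         "/mnt/bigdata/books/newbooks",
--         "/mnt/bigdata/books/itunes",
--     ]
--
--     for file_path in files: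
--         for source in source_paths:
--             if file_path.startswith(source):
--                 categorized[source].append(file_path)
--                 break
--         else:
--             # File doesn't match any of our target sources
--             categorized["other"].append(file_path)
--
--     return dict(categorized)
-- ===== SOURCE B (Python) =====
-- def categorize_by_source(files: list[str]) -> dict[str, list[str]]:
--     """Categorize files by source directory: classify each path once, then build
--     each bucket (in first-occurrence order) by filtering."""
--     source_paths = [
--         "/mnt/bigdata/books/abooks",
--         "/mnt/bigdata/books/newbooks",
--         "/mnt/bigdata/books/itunes",
--     ]
--
--     def cat(f: str) -> str:
--         return next((s for s in source_paths if f.startswith(s)), "other")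
--
--     cats = [cat(f) for f in files]
--     keys = list(dict.fromkeys(cats))
--     return {k: [f for f, c in zip(files, cats) if c == k] for k in keys}
-- ===== Notes on version B (the rewrite author's own statement) =====
-- stated objective: alternative
-- what changed: A makes one pass over files appending each path into a defaultdict bucket via an inner loop with break/for-else; B classifies each path with a single category function, deduplicates the category labels to get the key order, and builds each bucket by filtering the file list per category.
import Mathlib
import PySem

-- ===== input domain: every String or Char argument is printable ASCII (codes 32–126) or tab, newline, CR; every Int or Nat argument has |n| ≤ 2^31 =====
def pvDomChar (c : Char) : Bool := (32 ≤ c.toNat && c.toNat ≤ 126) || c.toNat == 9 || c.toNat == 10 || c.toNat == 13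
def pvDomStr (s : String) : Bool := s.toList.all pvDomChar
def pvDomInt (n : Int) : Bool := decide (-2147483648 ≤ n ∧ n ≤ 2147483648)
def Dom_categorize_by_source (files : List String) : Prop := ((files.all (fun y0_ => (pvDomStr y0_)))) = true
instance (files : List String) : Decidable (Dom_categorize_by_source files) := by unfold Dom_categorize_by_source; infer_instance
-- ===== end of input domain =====

-- B classifies each file once, deduplicates the category labels and builds each bucket by
-- filtering, replacing A's single defaultdict-appending pass (objective: simpler/alternative).

-- ===== PORT A =====
def pvSourcePaths : List String :=
  ["/mnt/bigdata/books/abooks", "/mnt/bigdata/books/newbooks", "/mnt/bigdata/books/itunes"]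

-- A's inner 'for source … if startswith: break / else: "other"' loop
def pvInnerA (file_path : String) : List String → String
  | [] => "other"
  | s :: rest => if PySem.Str.startswith file_path s then s else pvInnerA file_path rest

def categorize_by_source (files : List String) : List (String × List String) :=
  (files.foldl
    (fun categorized file_path =>
      categorized.modify (pvInnerA file_path pvSourcePaths) [] (· ++ [file_path]))
    PySem.Dict.empty).items

-- ===== PORT B =====
-- B's 'next((s for s in source_paths if f.startswith(s)), "other")'
def pvCatB (f : String) : String :=
  (pvSourcePaths.find? (fun s => PySem.Str.startswith f s)).getD "other"

def categorize_by_source_alt (files : List String) : List (String × List String) :=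
  let cats := files.map pvCatB
  let keys := PySem.List.dedup cats
  keys.map (fun k => (k, ((files.zip cats).filter (fun p => p.2 == k)).map (·.1)))

-- ===== PRECONDITION & SPEC =====
def Spec_categorize_by_source (files : List String) (out : List (String × List String)) : Prop := out = categorize_by_source_alt files
instance (files : List String) (out : List (String × List String)) : Decidable (Spec_categorize_by_source files out) := by unfold Spec_categorize_by_source; infer_instance

-- ===== CLAIM (what is proved, stated in full; the proofs are below) =====
def Claim_equal_categorize_by_source : Prop := ∀ (files : List String), Dom_categorize_by_source files → Spec_categorize_by_source files (categorize_by_source files)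

-- ===== LEMMAS AND PROOFS =====

-- A's inner loop computes B's category function
theorem pvInnerA_eq (f : String) (l : List String) :
    pvInnerA f l = (l.find? (fun s => PySem.Str.startswith f s)).getD "other" := by
  induction l with
  | nil => rfl
  | cons s rest ih =>
    simp only [pvInnerA, List.find?]
    cases h : PySem.Str.startswith f s
    · simp [h, ih]
    · simp [h]


-- A's fold over files, rewritten as a fold over (category, file) pairs
theorem pvFoldA_pairs (files : List String) (d : PySem.Dict String (List String)) :
    files.foldl (fun c f => c.modify (pvCatB f) [] (· ++ [f])) d
      = (files.map (fun f => (pvCatB f, f))).foldl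
          (fun c p => c.modify p.1 [] (· ++ [p.2])) d := by
  induction files generalizing d with
  | nil => rfl
  | cons f rest ih => simp [List.foldl, ih]

-- both bucket computations are the plain filter by category
theorem pvBucketA (files : List String) (k : String) :
    (((files.map (fun f => (pvCatB f, f))).filter (fun p => p.1 == k)).map (·.2))
      = files.filter (fun f => pvCatB f == k) := by
  induction files with
  | nil => rfl
  | cons f rest ih =>
    by_cases h : pvCatB f = k
    · simp [List.filter, h, ih]
    · have hb : (pvCatB f == k) = false := by simp [h]
      simp [List.filter, hb, ih]

theorem pvBucketB (files : List String) (k : String) :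
    (((files.zip (files.map pvCatB)).filter (fun p => p.2 == k)).map (·.1))
      = files.filter (fun f => pvCatB f == k) := by
  induction files with
  | nil => rfl
  | cons f rest ih =>
    by_cases h : pvCatB f = k
    · simp [List.filter, h, ih]
    · have hb : (pvCatB f == k) = false := by simp [h]
      simp [List.filter, hb, ih]

-- ===== VERDICT (by name: the statement is the Claim_ definition above) =====
theorem categorize_by_source_spec : Claim_equal_categorize_by_source := by
  intro files _
  unfold Spec_categorize_by_source categorize_by_source categorize_by_source_alt
  have hstep :
      (fun (c : PySem.Dict String (List String)) f =>
          c.modify (pvInnerA f pvSourcePaths) [] (· ++ [f]))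
        = (fun c f => c.modify (pvCatB f) [] (· ++ [f])) := by
    funext c f; rw [pvInnerA_eq]; rfl
  rw [hstep, pvFoldA_pairs]
  set D := (files.map (fun f => (pvCatB f, f))).foldl
      (fun c p => c.modify p.1 [] (· ++ [p.2])) PySem.Dict.empty with hD
  have hkeys : D.keys = PySem.Set.ofList (files.map pvCatB) := by
    rw [hD]
    have := PySem.Dict.keys_foldl_modify_key
      (l := files.map (fun f => (pvCatB f, f))) (key := Prod.fst)
      (d0 := ([] : List String)) (f := fun _ p l => l ++ [p.2])
      (d := PySem.Dict.empty)
    simp only [this, PySem.Dict.keys_empty, PySem.Set.update_nil_left,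
      List.map_map]
    rfl
  have hnodup : D.keys.Nodup := by
    rw [hkeys]; exact PySem.Set.nodup_ofList _
  have hitems := PySem.Dict.items_eq_map_keys D hnodup ([] : List String)
  rw [hitems, hkeys]
  have hset : PySem.Set.ofList (files.map pvCatB) = PySem.List.dedup (files.map pvCatB) := by
    simp [PySem.List.dedup_eq_ofList]
  rw [hset]
  apply List.map_congr_left
  intro k _
  have hgetD : D.getD k [] = files.filter (fun f => pvCatB f == k) := by
    rw [hD, PySem.Dict.getD_foldl_modify_append, PySem.Dict.getD_empty]
    simpa using pvBucketA files k
  rw [hgetD, pvBucketB]
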